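-- pv_equiv track=rewrite | github.com/yhs3434/Algorithms | programmers/handleString.py | solution
-- ===== SOURCE A (Python) =====
-- def solution(s):
--     answer = True
--
--     length = len(s)
--     if(length!=4 and length!=6):
--         answer = False
--     else:
--         for c in s:
--             if(c>='0' and c<='9'):
--                 continue
--             else:
--                 answer = False
--
--     return answer
-- ===== SOURCE B (Python) =====
-- def solution(s):
--     # Try to consume the whole string as exactly n digit characters, recursively.
--     def eats(t, n):
--         if n == 0:
--             return t == ''
--         return t[:1].isdigit() and eats(t[1:], n - 1)
--     return eats(s, 4) or eats(s, 6)
-- ===== Notes on version B (the rewrite author's own statement) =====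
-- stated objective: alternative
-- what changed: Replaces A's length check plus flag-accumulating loop with a recursive consumer that tries to eat the string as exactly 4 or exactly 6 digit characters, never computing len(s).
import Mathlib
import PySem

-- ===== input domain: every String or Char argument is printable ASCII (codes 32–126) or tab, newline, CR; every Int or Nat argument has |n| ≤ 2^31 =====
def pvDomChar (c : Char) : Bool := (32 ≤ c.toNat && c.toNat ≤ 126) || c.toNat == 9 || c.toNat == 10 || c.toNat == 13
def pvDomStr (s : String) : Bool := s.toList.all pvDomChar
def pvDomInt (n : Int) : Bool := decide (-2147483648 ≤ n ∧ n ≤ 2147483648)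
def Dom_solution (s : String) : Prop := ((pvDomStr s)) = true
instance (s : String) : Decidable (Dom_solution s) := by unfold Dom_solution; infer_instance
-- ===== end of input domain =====

-- B replaces A's length test plus flag loop with a recursive consumer eating exactly 4 or 6 digits; objective: alternative.

-- ===== PORT A =====
def solution (s : String) : Bool :=
  let length := PySem.Str.len s
  if length ≠ 4 ∧ length ≠ 6 then
    false
  else
    s.toList.foldl (fun answer c => if '0' ≤ c ∧ c ≤ '9' then answer else false) true

-- ===== PORT B =====
-- eats t n = Python's eats: n == 0 → t == ''; else t[:1].isdigit() and eats(t[1:], n-1)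
def pvEats : List Char → Nat → Bool
  | t, 0 => t == []
  | t, n + 1 =>
      PySem.Chars.strIsdigit (PySem.List.slice t none (some 1)) &&
        pvEats (PySem.List.slice t (some 1) none) n

def solution_alt (s : String) : Bool :=
  pvEats s.toList 4 || pvEats s.toList 6

-- ===== PRECONDITION & SPEC =====
def Spec_solution (s : String) (out : Bool) : Prop := out = solution_alt s
instance (s : String) (out : Bool) : Decidable (Spec_solution s out) := by unfold Spec_solution; infer_instance

-- ===== CLAIM (what is proved, stated in full; the proofs are below) =====
def Claim_equal_solution : Prop := ∀ (s : String), Dom_solution s → Spec_solution s (solution s)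

-- ===== LEMMAS AND PROOFS =====

-- the flag, once false, stays false
theorem foldl_flag_false (l : List Char) :
    l.foldl (fun answer c => if '0' ≤ c ∧ c ≤ '9' then answer else false) false = false := by
  induction l with
  | nil => rfl
  | cons c l ih => by_cases h : '0' ≤ c ∧ c ≤ '9' <;> simpa [List.foldl, h] using ih

-- A's flag loop is List.all
theorem foldl_flag_eq_all (l : List Char) :
    l.foldl (fun answer c => if '0' ≤ c ∧ c ≤ '9' then answer else false) true
      = l.all (fun c => decide ('0' ≤ c) && decide (c ≤ '9')) := by
  induction l with
  | nil => rfl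
  | cons c l ih =>
    by_cases h : '0' ≤ c ∧ c ≤ '9'
    · rw [List.foldl_cons, if_pos h, ih, List.all_cons]
      simp [h.1, h.2]
    · rw [List.foldl_cons, if_neg h, foldl_flag_false, List.all_cons]
      have hd : (decide ('0' ≤ c) && decide (c ≤ '9')) = false := by
        rcases Decidable.not_and_iff_or_not.mp h with h1 | h1 <;> simp [h1]
      rw [hd]; rfl

-- B's recursive consumer characterised: exactly n characters, all digits
theorem pvEats_eq (n : Nat) (l : List Char) :
    pvEats l n = (decide (l.length = n) && l.all (fun c => decide ('0' ≤ c) && decide (c ≤ '9'))) := by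
  induction n generalizing l with
  | zero =>
    cases l with
    | nil => rfl
    | cons c t => simp [pvEats]
  | succ n ih =>
    cases l with
    | nil => simp [pvEats, PySem.Chars.strIsdigit, PySem.List.slice]
    | cons c t =>
      have h1 : PySem.List.slice (c :: t) none (some (1 : Int)) = [c] := by
        simpa using PySem.List.slice_to_natCast (c :: t) 1
      have h2 : PySem.List.slice (c :: t) (some (1 : Int)) none = t := by
        simpa using PySem.List.slice_from_natCast (c :: t) 1
      rw [pvEats, h1, h2, ih]
      simp only [PySem.Chars.strIsdigit, PySem.Chars.isdigit, List.all_cons, List.all_nil,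
        List.length_cons, List.isEmpty_cons]
      cases hd : (decide ('0' ≤ c) && decide (c ≤ '9')) <;>
        cases hl : decide (t.length = n) <;>
          simp_all

-- ===== VERDICT (by name: the statement is the Claim_ definition above) =====
theorem solution_spec : Claim_equal_solution := by
  intro s _
  unfold Spec_solution solution solution_alt
  rw [foldl_flag_eq_all, pvEats_eq, pvEats_eq]
  simp only [PySem.Str.len_eq, String.length_toList]
  have e4 : ((s.length : Int) = 4) ↔ (s.length = 4) := by omega
  have e6 : ((s.length : Int) = 6) ↔ (s.length = 6) := by omega
  simp [e4, e6, Bool.and_or_distrib_right]
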